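-- pv_equiv track=rewrite | github.com/JaeHyeok-Han/Algorithm | PROGRAMMERS/n^2 배열 자르기.py | solution
-- ===== SOURCE A (Python) =====
-- def solution(n, left, right):
--     answer = []
--     sx = (left // n) + 1
--     sy = (left % n) + 1
--     ex = (right // n) + 1
--     ey = (right % n) + 1
--     if sx == ex:
--         for i in range(sy, ey + 1):
--             answer.append(max(sx, i))
--         return answer
--     for i in range(sx, ex + 1):
--         for j in range(1, n + 1):
--             if i == sx:
--                 if j >= sy:
--                     answer.append(max(i, j))
--             elif i == ex:
--                 if j <= ey:
--                     answer.append(max(i, j))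
--             else:
--                 answer.append(max(i, j))
--     return answer
-- ===== SOURCE B (Python) =====
-- def solution(n, left, right):
--     return [max(k // n, k % n) + 1 for k in range(left, right + 1)]
-- ===== Notes on version B (the rewrite author's own statement) =====
-- stated objective: simpler
-- what changed: Replaces A's nested row/column walk with per-row boundary branches (sx==ex special case, i==sx / i==ex conditionals) by one flat comprehension over k in range(left, right+1) using the closed-form cell value max(k//n, k%n)+1.
-- outside the precondition, e.g. on solution(-3, -8, -5): A returns [], B returns [3, 3, 3, 2]; on solution(0, 0, 0): A raises ZeroDivisionError, B raises ZeroDivisionError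
import Mathlib
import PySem

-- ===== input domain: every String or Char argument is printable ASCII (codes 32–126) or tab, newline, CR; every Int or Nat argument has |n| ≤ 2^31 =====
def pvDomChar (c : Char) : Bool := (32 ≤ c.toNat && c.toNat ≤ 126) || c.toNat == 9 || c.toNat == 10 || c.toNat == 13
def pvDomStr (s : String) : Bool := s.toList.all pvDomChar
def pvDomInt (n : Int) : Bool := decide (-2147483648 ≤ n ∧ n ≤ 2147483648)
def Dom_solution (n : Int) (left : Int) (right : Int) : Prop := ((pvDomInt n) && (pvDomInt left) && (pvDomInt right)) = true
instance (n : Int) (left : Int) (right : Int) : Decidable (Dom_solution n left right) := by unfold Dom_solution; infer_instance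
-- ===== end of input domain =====

-- B replaces A's nested row/column walk with boundary branches by one flat map of the
-- closed-form cell value max(k//n, k%n)+1 over range(left, right+1): simpler, one pass.

-- ===== PORT A =====
def solution (n : Int) (left : Int) (right : Int) : List Int :=
  let answer : List Int := []
  let sx := PySem.Int.floordiv left n + 1
  let sy := PySem.Int.mod left n + 1
  let ex := PySem.Int.floordiv right n + 1
  let ey := PySem.Int.mod right n + 1
  if sx = ex then
    (PySem.List.pyRange sy (ey + 1) 1).foldl (fun acc i => acc ++ [max sx i]) answer
  else
    (PySem.List.pyRange sx (ex + 1) 1).foldl (fun acc i =>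
      (PySem.List.pyRange 1 (n + 1) 1).foldl (fun acc2 j =>
        if i = sx then (if sy ≤ j then acc2 ++ [max i j] else acc2)
        else if i = ex then (if j ≤ ey then acc2 ++ [max i j] else acc2)
        else acc2 ++ [max i j]) acc) answer

-- ===== PORT B =====
def solution_alt (n : Int) (left : Int) (right : Int) : List Int :=
  (PySem.List.pyRange left (right + 1) 1).map
    (fun k => max (PySem.Int.floordiv k n) (PySem.Int.mod k n) + 1)

-- ===== PRECONDITION & SPEC =====
-- Pre_ restricts to the problem's natural domain n ≥ 1 (the side of an n×n grid): n = 0 makes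
-- A raise ZeroDivisionError, and for n < 0 A's descending/degenerate row ranges return values
-- no caller could want (see the cited example), so negative n is excluded as outside the domain.
def Pre_solution (n : Int) (left : Int) (right : Int) : Prop := 1 ≤ n
instance (n : Int) (left : Int) (right : Int) : Decidable (Pre_solution n left right) := by
  unfold Pre_solution; infer_instance

def pvWitness_solution : Int × Int × Int := (3, 2, 5)

def Spec_solution (n : Int) (left : Int) (right : Int) (out : List Int) : Prop :=
  out = solution_alt n left right
instance (n : Int) (left : Int) (right : Int) (out : List Int) : Decidable (Spec_solution n left right out) := by
  unfold Spec_solution; infer_instance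

-- ===== CLAIM (what is proved, stated in full; the proofs are below) =====
def Claim_equal_solution : Prop := ∀ (n : Int) (left : Int) (right : Int), Dom_solution n left right → Pre_solution n left right → Spec_solution n left right (solution n left right)

-- ===== LEMMAS AND PROOFS =====

-- the closed-form cell value, stated with ediv/emod (equal to B's floordiv/mod when 0 < n)
def pvF (n k : Int) : Int := max (k / n) (k % n) + 1

-- what each iteration of A's outer loop appends (row i of the grid slice)
def pvG (n ql ml qr mr : Int) (i : Int) : List Int :=
  if i = ql + 1 then (PySem.List.pyRange (ml + 1) (n + 1) 1).map (fun j => max i j)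
  else if i = qr + 1 then (PySem.List.pyRange 1 (mr + 1 + 1) 1).map (fun j => max i j)
  else (PySem.List.pyRange 1 (n + 1) 1).map (fun j => max i j)

theorem pv_alt_eq_map (n l r : Int) (hn : 0 < n) :
    solution_alt n l r = (PySem.List.pyRange l (r + 1) 1).map (pvF n) := by
  unfold solution_alt
  apply List.map_congr_left
  intro k _
  rw [PySem.Int.floordiv_eq_ediv_of_pos hn, PySem.Int.mod_eq_emod_of_pos hn]
  rfl

-- shifting a range under a map
theorem pv_shift (g : Int → Int) (a b c : Int) :
    (PySem.List.pyRange a b 1).map g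
      = (PySem.List.pyRange (a - c) (b - c) 1).map (fun x => g (x + c)) := by
  have hba : b - a = (b - c) - (a - c) := by ring
  rw [PySem.List.pyRange_one a b, PySem.List.pyRange_one (a - c) (b - c), ← hba,
    List.map_map, List.map_map]
  apply List.map_congr_left
  intro k _
  simp only [Function.comp_apply]
  congr 1
  ring

-- value of pvF inside one row
theorem pv_cell (n q s : Int) (hn : 0 < n) (hs : 0 ≤ s) (hlt : s < n) :
    pvF n (s + n * q) = max (q + 1) (s + 1) := by
  unfold pvF
  rw [Int.add_mul_ediv_left s q (by omega : n ≠ 0), Int.add_mul_emod_self_left,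
    Int.ediv_eq_zero_of_lt hs hlt, Int.emod_eq_of_lt hs hlt]
  omega

-- one (part of a) row of B's map is one row of grid values
theorem pv_row (n q a b : Int) (hn : 0 < n) (ha : n * q ≤ a) (hb : b ≤ n * (q + 1)) :
    (PySem.List.pyRange a b 1).map (pvF n)
      = (PySem.List.pyRange (a - n * q + 1) (b - n * q + 1) 1).map (fun j => max (q + 1) j) := by
  rw [pv_shift (pvF n) a b (n * q - 1)]
  have e1 : a - (n * q - 1) = a - n * q + 1 := by ring
  have e2 : b - (n * q - 1) = b - n * q + 1 := by ring
  rw [e1, e2]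
  apply List.map_congr_left
  intro j hj
  rw [PySem.List.mem_pyRange_one] at hj
  have e3 : j + (n * q - 1) = (j - 1) + n * q := by ring
  rw [e3, pv_cell n q (j - 1) hn (by omega) (by nlinarith [hj.1, hj.2, ha, hb])]
  omega

-- the full middle rows: consecutive whole rows flatten to consecutive cells
theorem pv_middle (n : Int) (hn : 0 < n) : ∀ (t : Nat) (u : Int),
    (PySem.List.pyRange (n * u) (n * (u + t)) 1).map (pvF n)
      = (PySem.List.pyRange (u + 1) (u + t + 1) 1).flatMap
          (fun i => (PySem.List.pyRange 1 (n + 1) 1).map (fun j => max i j)) := by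
  intro t
  induction t with
  | zero =>
    intro u
    simp only [Nat.cast_zero, add_zero]
    rw [PySem.List.pyRange_one_eq_nil (le_refl _), PySem.List.pyRange_one_eq_nil (le_refl _)]
    rfl
  | succ t ih =>
    intro u
    have h1 : n * u ≤ n * (u + 1) := by nlinarith
    have h2 : n * (u + 1) ≤ n * (u + (t + 1 : Nat)) := by push_cast; nlinarith
    rw [PySem.List.pyRange_one_append (n * u) (n * (u + 1)) (n * (u + (t + 1 : Nat))) h1 h2,
      List.map_append]
    have hrow := pv_row n u (n * u) (n * (u + 1)) hn (le_refl _) (le_refl _)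
    have e1 : n * u - n * u + 1 = 1 := by ring
    have e2 : n * (u + 1) - n * u + 1 = n + 1 := by ring
    rw [e1, e2] at hrow
    have e3 : n * (u + (t + 1 : Nat)) = n * ((u + 1) + (t : Nat)) := by push_cast; ring
    rw [hrow, e3, ih (u + 1)]
    have e5 : u + ((t + 1 : Nat) : Int) + 1 = (u + 1) + (t : Nat) + 1 := by push_cast; ring
    rw [e5, PySem.List.pyRange_one_cons (by omega : u + 1 < (u + 1) + (t : Nat) + 1),
      List.flatMap_cons]

-- filters of a full row range are sub-ranges
theorem pv_filter_ge (n sy : Int) (h1 : 1 ≤ sy) (h2 : sy ≤ n + 1) :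
    (PySem.List.pyRange 1 (n + 1) 1).filter (fun j => decide (sy ≤ j))
      = PySem.List.pyRange sy (n + 1) 1 := by
  rw [PySem.List.pyRange_one_append 1 sy (n + 1) h1 h2, List.filter_append]
  have hnil : (PySem.List.pyRange 1 sy 1).filter (fun j => decide (sy ≤ j)) = [] := by
    apply List.filter_eq_nil_iff.mpr
    intro j hj
    rw [PySem.List.mem_pyRange_one] at hj
    simp; omega
  have hself : (PySem.List.pyRange sy (n + 1) 1).filter (fun j => decide (sy ≤ j))
      = PySem.List.pyRange sy (n + 1) 1 := by
    apply List.filter_eq_self.mpr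
    intro j hj
    rw [PySem.List.mem_pyRange_one] at hj
    simp; omega
  rw [hnil, hself, List.nil_append]

theorem pv_filter_le (n ey : Int) (h1 : 0 ≤ ey) (h2 : ey ≤ n) :
    (PySem.List.pyRange 1 (n + 1) 1).filter (fun j => decide (j ≤ ey))
      = PySem.List.pyRange 1 (ey + 1) 1 := by
  rw [PySem.List.pyRange_one_append 1 (ey + 1) (n + 1) (by omega) (by omega), List.filter_append]
  have hself : (PySem.List.pyRange 1 (ey + 1) 1).filter (fun j => decide (j ≤ ey))
      = PySem.List.pyRange 1 (ey + 1) 1 := by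
    apply List.filter_eq_self.mpr
    intro j hj
    rw [PySem.List.mem_pyRange_one] at hj
    simp; omega
  have hnil : (PySem.List.pyRange (ey + 1) (n + 1) 1).filter (fun j => decide (j ≤ ey)) = [] := by
    apply List.filter_eq_nil_iff.mpr
    intro j hj
    rw [PySem.List.mem_pyRange_one] at hj
    simp; omega
  rw [hself, hnil, List.append_nil]

-- a fold whose step appends g i flattens to a flatMap (step only has to match on members)
theorem pv_foldl_flat {f : List Int → Int → List Int} {g : Int → List Int}
    (xs : List Int) (acc : List Int) (h : ∀ (a : List Int) (i : Int), i ∈ xs → f a i = a ++ g i) :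
    xs.foldl f acc = acc ++ xs.flatMap g := by
  induction xs generalizing acc with
  | nil => simp
  | cons x t ih =>
    rw [List.foldl_cons, h acc x (by simp), ih _ (fun a i hi => h a i (by simp [hi])),
      List.flatMap_cons, List.append_assoc]

theorem pv_main (n l r : Int) (hn : 0 < n) :
    solution n l r = solution_alt n l r := by
  rw [pv_alt_eq_map n l r hn]
  unfold solution
  dsimp only
  simp only [PySem.Int.floordiv_eq_ediv_of_pos hn, PySem.Int.mod_eq_emod_of_pos hn]
  have hl := Int.mul_ediv_add_emod l n
  have hr := Int.mul_ediv_add_emod r n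
  have hml0 : 0 ≤ l % n := Int.emod_nonneg l (by omega)
  have hmln : l % n < n := Int.emod_lt_of_pos l hn
  have hmr0 : 0 ≤ r % n := Int.emod_nonneg r (by omega)
  have hmrn : r % n < n := Int.emod_lt_of_pos r hn
  set ql := l / n with hql
  set ml := l % n with hml
  set qr := r / n with hqr
  set mr := r % n with hmr
  by_cases hq : ql + 1 = qr + 1
  · rw [if_pos hq]
    rw [PySem.List.foldl_append_singleton_eq_map, List.nil_append]
    have hq2 : qr = ql := by omega
    rw [hq2] at hr
    have er : n * (ql + 1) = n * ql + n := by ring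
    have hrow := pv_row n ql l (r + 1) hn (by linarith) (by linarith)
    have e1 : l - n * ql + 1 = ml + 1 := by linarith
    have e2 : r + 1 - n * ql + 1 = mr + 1 + 1 := by linarith
    rw [hrow, e1, e2]
  · rw [if_neg hq]
    by_cases hlt : ql < qr
    · -- at least two rows
      have hstep : ∀ (acc : List Int) (i : Int), i ∈ PySem.List.pyRange (ql + 1) (qr + 1 + 1) 1 →
          ((PySem.List.pyRange 1 (n + 1) 1).foldl (fun acc2 j =>
            if i = ql + 1 then (if ml + 1 ≤ j then acc2 ++ [max i j] else acc2)
            else if i = qr + 1 then (if j ≤ mr + 1 then acc2 ++ [max i j] else acc2)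
            else acc2 ++ [max i j]) acc) = acc ++ pvG n ql ml qr mr i := by
        intro acc i hi
        by_cases h1 : i = ql + 1
        · subst h1
          simp only [if_true]
          rw [PySem.List.foldl_append_ite (fun j => ml + 1 ≤ j) (fun j => max (ql + 1) j)]
          rw [pv_filter_ge n (ml + 1) (by omega) (by omega)]
          unfold pvG
          rw [if_pos rfl]
        · by_cases h2 : i = qr + 1
          · subst h2
            simp only [if_neg h1, if_true]
            rw [PySem.List.foldl_append_ite (fun j => j ≤ mr + 1) (fun j => max (qr + 1) j)]
            rw [pv_filter_le n (mr + 1) (by omega) (by omega)]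
            unfold pvG
            rw [if_neg h1, if_pos rfl]
          · simp only [if_neg h1, if_neg h2]
            rw [PySem.List.foldl_append_singleton_eq_map]
            unfold pvG
            rw [if_neg h1, if_neg h2]
      rw [pv_foldl_flat (PySem.List.pyRange (ql + 1) (qr + 1 + 1) 1) [] hstep, List.nil_append]
      -- split A's rows: first row, middle rows, last row
      rw [PySem.List.pyRange_one_append (ql + 1) (ql + 1 + 1) (qr + 1 + 1) (by omega) (by omega),
        PySem.List.pyRange_one_append (ql + 1 + 1) (qr + 1) (qr + 1 + 1) (by omega) (by omega),
        PySem.List.pyRange_one_singleton, PySem.List.pyRange_one_singleton,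
        List.flatMap_append, List.flatMap_append, List.flatMap_singleton, List.flatMap_singleton]
    -- split B's flat range at the same row boundaries
      have er1 : n * (ql + 1) = n * ql + n := by ring
      have er2 : n * (qr + 1) = n * qr + n := by ring
      have hmul : n * (ql + 1) ≤ n * qr :=
        mul_le_mul_of_nonneg_left (by omega : ql + 1 ≤ qr) (by omega : (0:Int) ≤ n)
      rw [PySem.List.pyRange_one_append l (n * (ql + 1)) (r + 1) (by linarith) (by linarith),
        PySem.List.pyRange_one_append (n * (ql + 1)) (n * qr) (r + 1) hmul (by linarith),
        List.map_append, List.map_append]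
      -- first chunk
      have hrow1 := pv_row n ql l (n * (ql + 1)) hn (by linarith) (le_refl _)
      have e11 : l - n * ql + 1 = ml + 1 := by linarith
      have e12 : n * (ql + 1) - n * ql + 1 = n + 1 := by ring
      rw [e11, e12] at hrow1
      -- last chunk
      have hrow3 := pv_row n qr (n * qr) (r + 1) hn (le_refl _) (by linarith)
      have e31 : n * qr - n * qr + 1 = 1 := by ring
      have e32 : r + 1 - n * qr + 1 = mr + 1 + 1 := by linarith
      rw [e31, e32] at hrow3
      -- middle chunk
      have hm := pv_middle n hn (qr - (ql + 1)).toNat (ql + 1)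
      have htt : (ql + 1) + ((qr - (ql + 1)).toNat : Int) = qr := by omega
      rw [htt] at hm
      rw [hrow1, hrow3, hm]
      congr 1
      · unfold pvG
        rw [if_pos rfl]
      congr 1
      · apply List.flatMap_congr
        intro i hi
        rw [PySem.List.mem_pyRange_one] at hi
        unfold pvG
        rw [if_neg (by omega), if_neg (by omega)]
      · unfold pvG
        rw [if_neg (by omega), if_pos rfl]
    · -- qr < ql : both sides empty
      have hlt2 : qr < ql := by omega
      have er : n * (qr + 1) = n * qr + n := by ring
      have hmul : n * (qr + 1) ≤ n * ql :=
        mul_le_mul_of_nonneg_left (by omega : qr + 1 ≤ ql) (by omega : (0:Int) ≤ n)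
      rw [PySem.List.pyRange_one_eq_nil (by omega : qr + 1 + 1 ≤ ql + 1),
        PySem.List.pyRange_one_eq_nil (by linarith : r + 1 ≤ l)]
      rfl

-- ===== VERDICT (by name: the statement is the Claim_ definition above) =====
theorem solution_spec : Claim_equal_solution := by
  intro n l r _ hn
  unfold Spec_solution
  exact pv_main n l r hn
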